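-- pv_equiv track=rewrite | github.com/Bharathhh30/JS | nihar.py | swap_odd_even_chars
-- ===== SOURCE A (Python) =====
-- def swap_odd_even_chars(str):
--     res = ""
--     odd = []
--     even = []
--
--     for i in range(len(str)):
--         if i % 2 == 0:
--             even.append(str[i])
--         else:
--             odd.append(str[i])
--
--     for i in range(max(len(even), len(odd))):
--         if i < len(odd):
--             res += odd[i]
--         if i < len(even):
--             res += even[i]
--
--     return res
-- ===== SOURCE B (Python) =====
-- def swap_odd_even_chars(str):
--     out = []
--     n = len(str)
--     for i in range(0, n, 2):
--         if i + 1 < n: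
--             out.append(str[i + 1])
--             out.append(str[i])
--         else:
--             out.append(str[i])
--     return ''.join(out)
-- ===== Notes on version B (the rewrite author's own statement) =====
-- stated objective: simpler
-- what changed: B drops A's split-into-even/odd-lists-then-interleave decomposition and builds the result in a single loop striding over the string two characters at a time, swapping each pair in place.
import Mathlib
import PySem

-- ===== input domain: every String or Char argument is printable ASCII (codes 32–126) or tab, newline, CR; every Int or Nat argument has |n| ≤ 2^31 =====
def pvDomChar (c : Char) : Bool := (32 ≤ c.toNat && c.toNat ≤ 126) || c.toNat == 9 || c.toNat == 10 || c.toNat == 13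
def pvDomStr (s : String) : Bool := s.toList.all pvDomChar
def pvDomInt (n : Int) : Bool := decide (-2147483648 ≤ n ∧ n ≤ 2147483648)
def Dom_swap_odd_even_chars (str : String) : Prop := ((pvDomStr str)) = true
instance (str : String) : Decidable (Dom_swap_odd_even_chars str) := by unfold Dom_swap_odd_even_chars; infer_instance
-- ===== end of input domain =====

-- B replaces A's split-into-even/odd-lists-then-interleave decomposition by a single
-- recursive pass swapping two characters at a time (objective: simpler).

-- ===== PORT A =====
def swap_odd_even_chars (str : String) : String :=
  let cs := str.toList
  let eo := (PySem.List.pyRange 0 (PySem.List.len cs) 1).foldl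
    (fun (p : List Char × List Char) i =>
      if PySem.Int.mod i 2 == 0 then (p.1 ++ [PySem.List.pyGetD cs i ' '], p.2)
      else (p.1, p.2 ++ [PySem.List.pyGetD cs i ' '])) ([], [])
  let even := eo.1
  let odd := eo.2
  let res := (PySem.List.pyRange 0 (max (PySem.List.len even) (PySem.List.len odd)) 1).foldl
    (fun (res : List Char) i =>
      let res := if i < PySem.List.len odd then res ++ [PySem.List.pyGetD odd i ' '] else res
      if i < PySem.List.len even then res ++ [PySem.List.pyGetD even i ' '] else res) []
  String.mk res

-- ===== PORT B =====
def swap_odd_even_chars_alt (str : String) : String :=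
  let cs := str.toList
  let n := PySem.List.len cs
  let out := (PySem.List.pyRange 0 n 2).foldl
    (fun (out : List Char) i =>
      if i + 1 < n then
        (out ++ [PySem.List.pyGetD cs (i + 1) ' ']) ++ [PySem.List.pyGetD cs i ' ']
      else out ++ [PySem.List.pyGetD cs i ' ']) []
  String.mk out

-- ===== PRECONDITION & SPEC =====
def Spec_swap_odd_even_chars (str : String) (out : String) : Prop := out = swap_odd_even_chars_alt str
instance (str : String) (out : String) : Decidable (Spec_swap_odd_even_chars str out) := by unfold Spec_swap_odd_even_chars; infer_instance

-- ===== CLAIM (what is proved, stated in full; the proofs are below) =====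
def Claim_equal_swap_odd_even_chars : Prop := ∀ (str : String), Dom_swap_odd_even_chars str → Spec_swap_odd_even_chars str (swap_odd_even_chars str)

-- ===== LEMMAS AND PROOFS =====

-- proof helper: the pairwise swap as a recursion on the character list
def pvSwapGo : List Char → List Char
  | a :: b :: rest => b :: a :: pvSwapGo rest
  | cs => cs

-- characters at even positions 0,2,4,… / odd positions 1,3,5,…
def pvEvens : List Char → List Char
  | [] => []
  | [a] => [a]
  | a :: _ :: t => a :: pvEvens t

def pvOdds : List Char → List Char
  | [] => []
  | _ :: t => pvEvens t

lemma pvEvens_cons (a : Char) (t : List Char) : pvEvens (a :: t) = a :: pvOdds t := by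
  cases t <;> rfl

-- zipper interleaving: o0 e0 o1 e1 …, then the tail of the longer list
def pvInter : List Char → List Char → List Char
  | [], e => e
  | o, [] => o
  | a :: o, b :: e => a :: b :: pvInter o e

lemma pvInter_nil_right (o : List Char) : pvInter o [] = o := by
  cases o <;> rfl

lemma pv_fmod_two (s : Int) : PySem.Int.mod s 2 = s % 2 := by
  simp [PySem.Int.mod, Int.fmod_eq_emod]

-- A's first loop over enumerate: splits into (evens, odds), parity of the start index
-- deciding which accumulator receives which.
lemma pvSplitFold (cs : List Char) : ∀ (s : Int) (e o : List Char),
    (PySem.List.enumerate cs s).foldl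
      (fun (p : List Char × List Char) ic =>
        if PySem.Int.mod ic.1 2 == 0 then (p.1 ++ [ic.2], p.2) else (p.1, p.2 ++ [ic.2]))
      (e, o)
    = if PySem.Int.mod s 2 == 0 then (e ++ pvEvens cs, o ++ pvOdds cs)
      else (e ++ pvOdds cs, o ++ pvEvens cs) := by
  induction cs with
  | nil =>
    intro s e o
    simp only [PySem.List.enumerate_nil, List.foldl_nil, pvEvens, pvOdds]
    split <;> simp
  | cons a t ih =>
    intro s e o
    rw [PySem.List.enumerate_cons, List.foldl_cons]
    have hflip : PySem.Int.mod (s + 1) 2 = 0 ↔ ¬ PySem.Int.mod s 2 = 0 := by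
      rw [pv_fmod_two, pv_fmod_two]; omega
    by_cases h : PySem.Int.mod s 2 = 0
    · have h1 : ¬ PySem.Int.mod (s + 1) 2 = 0 := by rw [hflip]; exact not_not_intro h
      have hbt : (PySem.Int.mod s 2 == 0) = true := by rw [h]; rfl
      have h1b : (PySem.Int.mod (s + 1) 2 == 0) = false := by
        rw [beq_eq_false_iff_ne]; exact h1
      simp only [hbt, if_true]
      rw [ih (s + 1)]
      simp only [h1b, Bool.false_eq_true, if_false]
      simp [pvEvens_cons, pvOdds]
    · have h1 : PySem.Int.mod (s + 1) 2 = 0 := hflip.mpr h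
      have hbf : (PySem.Int.mod s 2 == 0) = false := by rw [beq_eq_false_iff_ne]; exact h
      have h1b : (PySem.Int.mod (s + 1) 2 == 0) = true := by rw [h1]; rfl
      simp only [hbf, Bool.false_eq_true, if_false]
      rw [ih (s + 1)]
      simp only [h1b, if_true]
      simp [pvEvens_cons, pvOdds]

-- A's second loop: indexing into the fixed lists O and E from position j onward
-- produces the interleaving of the dropped suffixes.
lemma pvInterFold (O E : List Char) : ∀ (k : Nat) (j : Int) (r : List Char), 0 ≤ j →
    k = (max (PySem.List.len E) (PySem.List.len O) - j).toNat →
    (PySem.List.pyRange j (max (PySem.List.len E) (PySem.List.len O)) 1).foldl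
      (fun (res : List Char) i =>
        let res := if i < PySem.List.len O then res ++ [PySem.List.pyGetD O i ' '] else res
        if i < PySem.List.len E then res ++ [PySem.List.pyGetD E i ' '] else res) r
    = r ++ pvInter (O.drop j.toNat) (E.drop j.toNat) := by
  intro k
  induction k with
  | zero =>
    intro j r hj hk
    have hle : max (PySem.List.len E) (PySem.List.len O) ≤ j := by
      simp only [PySem.List.len_eq] at hk ⊢; omega
    rw [PySem.List.pyRange_one_eq_nil hle, List.foldl_nil]
    have hO : O.drop j.toNat = [] := List.drop_eq_nil_of_le (by
      simp only [PySem.List.len_eq] at hle; omega)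
    have hE : E.drop j.toNat = [] := List.drop_eq_nil_of_le (by
      simp only [PySem.List.len_eq] at hle; omega)
    simp [hO, hE, pvInter]
  | succ k ih =>
    intro j r hj hk
    have hlt : j < max (PySem.List.len E) (PySem.List.len O) := by
      simp only [PySem.List.len_eq] at hk ⊢; omega
    rw [PySem.List.pyRange_one_cons hlt, List.foldl_cons]
    rw [ih (j + 1) _ (by omega) (by simp only [PySem.List.len_eq] at hk ⊢; omega)]
    have hj1 : (j + 1).toNat = j.toNat + 1 := by omega
    simp only [hj1]
    simp only [PySem.List.len_eq] at hlt ⊢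
    by_cases hO : j < (O.length : Int)
    · have hOn : j.toNat < O.length := by omega
      rw [List.drop_eq_getElem_cons hOn, PySem.List.pyGetD_eq_getElem O ' ' hj (by omega)]
      by_cases hE : j < (E.length : Int)
      · have hEn : j.toNat < E.length := by omega
        rw [List.drop_eq_getElem_cons hEn, PySem.List.pyGetD_eq_getElem E ' ' hj (by omega)]
        simp [hO, hE, pvInter]
      · have hEnil : ∀ m : Nat, j.toNat ≤ m → E.drop m = [] := fun m hm =>
          List.drop_eq_nil_of_le (by omega)
        rw [hEnil j.toNat le_rfl, hEnil (j.toNat + 1) (by omega)]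
        simp [hO, hE, pvInter_nil_right]
    · have hE : j < (E.length : Int) := by omega
      have hEn : j.toNat < E.length := by omega
      rw [List.drop_eq_getElem_cons hEn, PySem.List.pyGetD_eq_getElem E ' ' hj (by omega)]
      have hOnil : ∀ m : Nat, j.toNat ≤ m → O.drop m = [] := fun m hm =>
        List.drop_eq_nil_of_le (by omega)
      rw [hOnil j.toNat le_rfl, hOnil (j.toNat + 1) (by omega)]
      simp [hO, hE, pvInter]

-- step-2 range unrolling
lemma pvRange2_nil {a b : Int} (h : b ≤ a) : PySem.List.pyRange a b 2 = [] := by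
  rw [PySem.List.pyRange_of_pos a b (by norm_num)]
  rw [if_neg (not_lt.mpr h)]
  rfl

lemma pvRange2_cons {a b : Int} (h : a < b) :
    PySem.List.pyRange a b 2 = a :: PySem.List.pyRange (a + 2) b 2 := by
  rw [PySem.List.pyRange_of_pos a b (by norm_num),
    PySem.List.pyRange_of_pos (a + 2) b (by norm_num)]
  have hm : ((b - a + 2 - 1) / 2).toNat
      = (if a + 2 < b then ((b - (a + 2) + 2 - 1) / 2).toNat else 0) + 1 := by
    split <;> omega
  rw [if_pos h, hm, List.range_succ_eq_map, List.map_cons, List.map_map]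
  refine congrArg₂ _ (by ring) ?_
  apply List.map_congr_left
  intro k _
  simp only [Function.comp_apply]
  push_cast
  ring

-- B's stride-2 loop from position j onward performs the pairwise swap of the suffix.
lemma pvStrideFold (cs : List Char) (k : Nat) : ∀ (j : Int) (r : List Char), 0 ≤ j →
    k = ((cs.length : Int) - j).toNat →
    (PySem.List.pyRange j (PySem.List.len cs) 2).foldl
      (fun (out : List Char) i =>
        if i + 1 < PySem.List.len cs then
          (out ++ [PySem.List.pyGetD cs (i + 1) ' ']) ++ [PySem.List.pyGetD cs i ' ']
        else out ++ [PySem.List.pyGetD cs i ' ']) r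
    = r ++ pvSwapGo (cs.drop j.toNat) := by
  induction k using Nat.strong_induction_on with
  | _ k ih =>
    intro j r hj hk
    have hl : PySem.List.len cs = (cs.length : Int) := PySem.List.len_eq cs
    by_cases hjn : j < (cs.length : Int)
    · rw [pvRange2_cons (show j < PySem.List.len cs by rw [hl]; exact hjn), List.foldl_cons]
      by_cases h2 : j + 1 < (cs.length : Int)
      · have hd1 : j.toNat < cs.length := by omega
        have hd2 : j.toNat + 1 < cs.length := by omega
        rw [if_pos (show j + 1 < PySem.List.len cs by rw [hl]; exact h2),
          PySem.List.pyGetD_eq_getElem cs ' ' hj (by omega),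
          PySem.List.pyGetD_eq_getElem cs ' ' (by omega) (by omega),
          ih ((cs.length : Int) - (j + 2)).toNat (by omega) (j + 2) _ (by omega) (by omega),
          List.drop_eq_getElem_cons hd1, List.drop_eq_getElem_cons hd2]
        have hj2 : (j + 2).toNat = j.toNat + 1 + 1 := by omega
        have hj1 : (j + 1).toNat = j.toNat + 1 := by omega
        simp [pvSwapGo, hj2, hj1]
      · have hlast : j.toNat < cs.length := by omega
        rw [if_neg (show ¬ j + 1 < PySem.List.len cs by rw [hl]; exact h2),
          pvRange2_nil (show PySem.List.len cs ≤ j + 2 by rw [hl]; omega), List.foldl_nil,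
          List.drop_eq_getElem_cons hlast,
          List.drop_eq_nil_of_le (by omega),
          PySem.List.pyGetD_eq_getElem cs ' ' hj (by omega)]
        simp [pvSwapGo]
    · rw [pvRange2_nil (show PySem.List.len cs ≤ j by rw [hl]; omega), List.foldl_nil,
        List.drop_eq_nil_of_le (by omega)]
      simp [pvSwapGo]

-- B's pairwise swap is exactly "odd-position chars interleaved with even-position chars".
lemma pvSwapGo_eq : ∀ cs : List Char, pvSwapGo cs = pvInter (pvOdds cs) (pvEvens cs)
  | [] => rfl
  | [_] => rfl
  | a :: b :: t => by
    show b :: a :: pvSwapGo t = pvInter (pvOdds (a :: b :: t)) (pvEvens (a :: b :: t))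
    rw [pvSwapGo_eq t]
    simp [pvOdds, pvEvens_cons, pvInter]

-- ===== VERDICT (by name: the statement is the Claim_ definition above) =====
theorem swap_odd_even_chars_spec : Claim_equal_swap_odd_even_chars := by
  intro str _
  unfold Spec_swap_odd_even_chars swap_odd_even_chars swap_odd_even_chars_alt
  set cs := str.toList with hcs
  have h1 : (PySem.List.pyRange 0 (PySem.List.len cs) 1).foldl
      (fun (p : List Char × List Char) i =>
        if PySem.Int.mod i 2 == 0 then (p.1 ++ [PySem.List.pyGetD cs i ' '], p.2)
        else (p.1, p.2 ++ [PySem.List.pyGetD cs i ' '])) ([], [])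
      = (pvEvens cs, pvOdds cs) := by
    have := PySem.List.enumerate_eq_map_pyRange cs ' '
    calc (PySem.List.pyRange 0 (PySem.List.len cs) 1).foldl
          (fun (p : List Char × List Char) i =>
            if PySem.Int.mod i 2 == 0 then (p.1 ++ [PySem.List.pyGetD cs i ' '], p.2)
            else (p.1, p.2 ++ [PySem.List.pyGetD cs i ' '])) ([], [])
        = (PySem.List.enumerate cs 0).foldl
            (fun (p : List Char × List Char) ic =>
              if PySem.Int.mod ic.1 2 == 0 then (p.1 ++ [ic.2], p.2)
              else (p.1, p.2 ++ [ic.2])) ([], []) := by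
          rw [this, List.foldl_map]
      _ = (([] : List Char) ++ pvEvens cs, ([] : List Char) ++ pvOdds cs) := by
          rw [pvSplitFold cs 0 [] []]; norm_num [pv_fmod_two]
      _ = (pvEvens cs, pvOdds cs) := by simp
  simp only [h1]
  rw [pvInterFold (pvOdds cs) (pvEvens cs)
      (max (PySem.List.len (pvEvens cs)) (PySem.List.len (pvOdds cs)) - 0).toNat 0 []
      le_rfl rfl]
  rw [pvStrideFold cs ((cs.length : Int) - 0).toNat 0 [] le_rfl rfl]
  simp [pvSwapGo_eq]
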